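-- pv_equiv track=rewrite | github.com/mars-ssj/algorithm-python | src/dp/knapsack.py | solution_max_weight
-- ===== SOURCE A (Python) =====
-- def solution_max_weight(weights, weight_limit, n):
--     states = [[False for _ in range(weight_limit+1)] for _ in range(n)]
--
--     states[0][0] = True
--     if weights[0] <= weight_limit:
--         states[0][weights[0]] = True
--
--     for i in range(1, n):
--         for j in range(0, weight_limit+1):
--             if states[i-1][j]:
--                 states[i][j] = True
--                 if j + weights[i] <= weight_limit:
--                     states[i][j+weights[i]] = True
--
--     for k in range(weight_limit, -1, -1):
--         if states[n-1][k]: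
--             return k
--     return 0
-- ===== SOURCE B (Python) =====
-- def solution_max_weight(weights, weight_limit, n):
--     mask = (1 << (weight_limit + 1)) - 1
--     bits = 1
--     if weights[0] <= weight_limit:
--         bits |= 1 << weights[0]
--         bits &= mask
--     for i in range(1, n):
--         w = weights[i]
--         if w <= weight_limit:
--             bits |= bits << w
--             bits &= mask
--     return bits.bit_length() - 1
-- ===== Notes on version B (the rewrite author's own statement) =====
-- stated objective: alternative
-- what changed: Replaces the n x (weight_limit+1) boolean DP table (plus a downward final scan) by a single bitmask integer of reachable subset sums (bits |= bits << w, truncated to weight_limit+1 bits), returning bits.bit_length()-1; Pre_ excludes inputs where A raises (n<1, n>len(weights), weight_limit<0) and negative item weights, outside the knapsack's natural domain, where A's value comes from negative-index wraparound and B's shift raises.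
-- outside the precondition, e.g. on solution_max_weight([-1], 2, 1): A returns 2, B raises ValueError
import Mathlib
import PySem

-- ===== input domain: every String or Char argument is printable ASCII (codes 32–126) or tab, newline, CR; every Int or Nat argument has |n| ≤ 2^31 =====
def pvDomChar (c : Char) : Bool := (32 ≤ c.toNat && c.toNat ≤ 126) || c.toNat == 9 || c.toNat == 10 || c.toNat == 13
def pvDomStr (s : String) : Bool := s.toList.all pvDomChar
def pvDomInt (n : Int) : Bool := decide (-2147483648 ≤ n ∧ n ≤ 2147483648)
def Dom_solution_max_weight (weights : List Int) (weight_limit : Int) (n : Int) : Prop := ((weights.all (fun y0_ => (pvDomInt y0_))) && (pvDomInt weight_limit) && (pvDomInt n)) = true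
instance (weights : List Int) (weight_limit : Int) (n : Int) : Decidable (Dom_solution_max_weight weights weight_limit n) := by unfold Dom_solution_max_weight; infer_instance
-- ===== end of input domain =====

-- B replaces A's n x (weight_limit+1) boolean DP table and downward scan by a single bitmask
-- integer of reachable subset sums (bits |= bits << w, truncated to weight_limit+1 bits),
-- returning bits.bit_length() - 1: a different data structure with one flat loop.


-- ===== PORT A =====
def solution_max_weight (weights : List Int) (weight_limit : Int) (n : Int) : Int :=
  -- states = [[False]*(weight_limit+1) for _ in range(n)]
  let states0 : List (List Bool) :=
    (PySem.List.pyRange 0 n 1).map (fun _ => (PySem.List.pyRange 0 (weight_limit+1) 1).map (fun _ => false))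
  -- states[0][0] = True
  let states1 := PySem.List.pySetD states0 0 (PySem.List.pySetD (PySem.List.pyGetD states0 0 []) 0 true)
  -- if weights[0] <= weight_limit: states[0][weights[0]] = True
  let states2 :=
    if PySem.List.pyGetD weights 0 0 ≤ weight_limit then
      PySem.List.pySetD states1 0
        (PySem.List.pySetD (PySem.List.pyGetD states1 0 []) (PySem.List.pyGetD weights 0 0) true)
    else states1
  -- for i in range(1, n): for j in range(0, weight_limit+1): ...
  let states3 := (PySem.List.pyRange 1 n 1).foldl (fun st i =>
      (PySem.List.pyRange 0 (weight_limit+1) 1).foldl (fun st2 j =>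
        if PySem.List.pyGetD (PySem.List.pyGetD st2 (i-1) []) j false then
          let st3 := PySem.List.pySetD st2 i (PySem.List.pySetD (PySem.List.pyGetD st2 i []) j true)
          if j + PySem.List.pyGetD weights i 0 ≤ weight_limit then
            PySem.List.pySetD st3 i
              (PySem.List.pySetD (PySem.List.pyGetD st3 i []) (j + PySem.List.pyGetD weights i 0) true)
          else st3
        else st2) st) states2
  -- for k in range(weight_limit, -1, -1): if states[n-1][k]: return k
  match (PySem.List.pyRange weight_limit (-1) (-1)).find?
          (fun k => PySem.List.pyGetD (PySem.List.pyGetD states3 (n-1) []) k false) with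
  | some k => k
  | none => 0

-- ===== PORT B =====
def solution_max_weight_alt (weights : List Int) (weight_limit : Int) (n : Int) : Int :=
  -- mask = (1 << (weight_limit + 1)) - 1   (Python raises on a negative shift count; Pre_ gives 0 ≤ weight_limit)
  let mask : Int := ((1 : Int) <<< (weight_limit + 1).toNat) - 1
  -- bits = 1; if weights[0] <= weight_limit: bits |= 1 << weights[0]; bits &= mask
  let bits : Int := 1
  let bits :=
    if PySem.List.pyGetD weights 0 0 ≤ weight_limit then
      PySem.Int.band (PySem.Int.bor bits ((1:Int) <<< (PySem.List.pyGetD weights 0 0).toNat)) mask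
    else bits
  -- for i in range(1, n): w = weights[i]; if w <= weight_limit: bits |= bits << w; bits &= mask
  -- (a negative w raises in Python: Pre_ gives nonnegative weights, so .toNat on the shift is exact)
  let bits := (PySem.List.pyRange 1 n 1).foldl (fun b i =>
      let w := PySem.List.pyGetD weights i 0
      if w ≤ weight_limit then
        PySem.Int.band (PySem.Int.bor b (b <<< w.toNat)) mask
      else b) bits
  -- return bits.bit_length() - 1
  (PySem.Int.bitLength bits : Int) - 1

-- ===== PRECONDITION & SPEC =====
-- Pre_ restricts to the natural knapsack domain: 1 ≤ n ≤ len(weights) and weight_limit ≥ 0 (A raises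
-- IndexError otherwise) and nonnegative item weights among the first n — negative weights are outside
-- the problem's natural domain: there A either raises or returns a value produced by negative-index
-- table wraparound, while B's left shift raises ValueError.
def Pre_solution_max_weight (weights : List Int) (weight_limit : Int) (n : Int) : Prop :=
  1 ≤ n ∧ n ≤ (weights.length : Int) ∧ 0 ≤ weight_limit ∧ ∀ w ∈ weights.take n.toNat, 0 ≤ w
instance (weights : List Int) (weight_limit : Int) (n : Int) : Decidable (Pre_solution_max_weight weights weight_limit n) := by unfold Pre_solution_max_weight; infer_instance
def pvWitness_solution_max_weight : List Int × Int × Int := ([2, 3], 4, 2)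

def Spec_solution_max_weight (weights : List Int) (weight_limit : Int) (n : Int) (out : Int) : Prop := out = solution_max_weight_alt weights weight_limit n
instance (weights : List Int) (weight_limit : Int) (n : Int) (out : Int) : Decidable (Spec_solution_max_weight weights weight_limit n out) := by unfold Spec_solution_max_weight; infer_instance

-- ===== CLAIM (what is proved, stated in full; the proofs are below) =====
def Claim_equal_solution_max_weight : Prop := ∀ (weights : List Int) (weight_limit : Int) (n : Int), Dom_solution_max_weight weights weight_limit n → Pre_solution_max_weight weights weight_limit n → Spec_solution_max_weight weights weight_limit n (solution_max_weight weights weight_limit n)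

-- ===== LEMMAS AND PROOFS =====

-- pyGetD on a list whose elements are all the default
lemma pv_getD_const {α : Type} (xs : List α) (i : Int) (d : α) (h : ∀ x ∈ xs, x = d) :
    PySem.List.pyGetD xs i d = d := by
  show (PySem.List.pyGet? xs i).getD d = d
  cases hx : PySem.List.pyGet? xs i with
  | none => rfl
  | some x => simpa using h x (PySem.List.mem_of_pyGet?_eq_some xs hx)

lemma pv_getD_setD {α : Type} (xs : List α) (i j : Int) (v d : α)
    (h0 : 0 ≤ i) (h1 : i < (xs.length : Int)) (hj : 0 ≤ j) :
    PySem.List.pyGetD (PySem.List.pySetD xs i v) j d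
      = if j = i then v else PySem.List.pyGetD xs j d := by
  rw [PySem.List.pySetD_of_nonneg xs v h0]
  have hl : PySem.List.pyGetD (xs.set i.toNat v) j d = ((xs.set i.toNat v)[j.toNat]?).getD d := by
    show (PySem.List.pyGet? _ j).getD d = _
    rw [PySem.List.pyGet?_of_nonneg _ hj]
  have hr : PySem.List.pyGetD xs j d = (xs[j.toNat]?).getD d := by
    show (PySem.List.pyGet? _ j).getD d = _
    rw [PySem.List.pyGet?_of_nonneg _ hj]
  rw [hl, List.getElem?_set]
  by_cases he : j = i
  · have h2 : i.toNat = j.toNat := by omega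
    have h3 : i.toNat < xs.length := by omega
    simp [he, h2, show j.toNat < xs.length by omega]
  · have h2 : ¬ i.toNat = j.toNat := by omega
    simp [he, h2, hr]

lemma pv_setD_setD {α : Type} (xs : List α) (i : Int) (a b : α) (h0 : 0 ≤ i) :
    PySem.List.pySetD (PySem.List.pySetD xs i a) i b = PySem.List.pySetD xs i b := by
  rw [PySem.List.pySetD_of_nonneg xs a h0, PySem.List.pySetD_of_nonneg _ b h0,
      PySem.List.pySetD_of_nonneg xs b h0, List.set_set]

lemma pv_setD_self {α : Type} (xs : List α) (i : Int) (d : α)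
    (h0 : 0 ≤ i) (h1 : i < (xs.length : Int)) :
    PySem.List.pySetD xs i (PySem.List.pyGetD xs i d) = xs := by
  have hlt : i.toNat < xs.length := by omega
  rw [PySem.List.pySetD_of_nonneg xs _ h0, PySem.List.pyGetD_eq_getElem xs d h0 h1,
      List.set_getElem_self]

-- the row transformation performed by A's inner loop (writes to row i only)
def rowUpd (W w : Int) (prev cur : List Bool) (j : Int) : List Bool :=
  if PySem.List.pyGetD prev j false then
    if j + w ≤ W then
      PySem.List.pySetD (PySem.List.pySetD cur j true) (j + w) true
    else PySem.List.pySetD cur j true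
  else cur

lemma rowUpd_length (W w : Int) (prev cur : List Bool) (j : Int) :
    (rowUpd W w prev cur j).length = cur.length := by
  unfold rowUpd
  split_ifs <;> simp [PySem.List.length_pySetD]

-- one iteration of A's inner loop only rewrites row i
lemma innerStep (weights : List Int) (W : Int) (st : List (List Bool)) (i j : Int)
    (hi1 : 1 ≤ i) (hil : i < (st.length : Int)) :
    (if PySem.List.pyGetD (PySem.List.pyGetD st (i-1) []) j false then
       let st3 := PySem.List.pySetD st i (PySem.List.pySetD (PySem.List.pyGetD st i []) j true)
       if j + PySem.List.pyGetD weights i 0 ≤ W then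
         PySem.List.pySetD st3 i
           (PySem.List.pySetD (PySem.List.pyGetD st3 i []) (j + PySem.List.pyGetD weights i 0) true)
       else st3
     else st)
    = PySem.List.pySetD st i
        (rowUpd W (PySem.List.pyGetD weights i 0) (PySem.List.pyGetD st (i-1) [])
          (PySem.List.pyGetD st i []) j) := by
  have h0i : (0:Int) ≤ i := by omega
  unfold rowUpd
  by_cases hb : PySem.List.pyGetD (PySem.List.pyGetD st (i-1) []) j false = true
  · rw [if_pos hb, if_pos hb]
    have hget : PySem.List.pyGetD
        (PySem.List.pySetD st i (PySem.List.pySetD (PySem.List.pyGetD st i []) j true)) i []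
        = PySem.List.pySetD (PySem.List.pyGetD st i []) j true := by
      rw [pv_getD_setD st i i _ [] h0i hil h0i, if_pos rfl]
    show (if j + PySem.List.pyGetD weights i 0 ≤ W then
         PySem.List.pySetD (PySem.List.pySetD st i (PySem.List.pySetD (PySem.List.pyGetD st i []) j true)) i
           (PySem.List.pySetD (PySem.List.pyGetD
             (PySem.List.pySetD st i (PySem.List.pySetD (PySem.List.pyGetD st i []) j true)) i [])
             (j + PySem.List.pyGetD weights i 0) true)
       else PySem.List.pySetD st i (PySem.List.pySetD (PySem.List.pyGetD st i []) j true)) = _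
    rw [hget]
    split_ifs with hc
    · rw [pv_setD_setD st i _ _ h0i]
    · rfl
  · rw [if_neg hb, if_neg hb]
    exact (pv_setD_self st i [] h0i hil).symm

-- A's inner fold over states equals an update of row i alone
lemma innerEq (weights : List Int) (W : Int) :
    ∀ (L : List Int) (st : List (List Bool)) (i : Int), 1 ≤ i → i < (st.length : Int) →
    L.foldl (fun st2 j =>
      if PySem.List.pyGetD (PySem.List.pyGetD st2 (i-1) []) j false then
        let st3 := PySem.List.pySetD st2 i (PySem.List.pySetD (PySem.List.pyGetD st2 i []) j true)
        if j + PySem.List.pyGetD weights i 0 ≤ W then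
          PySem.List.pySetD st3 i
            (PySem.List.pySetD (PySem.List.pyGetD st3 i []) (j + PySem.List.pyGetD weights i 0) true)
        else st3
      else st2) st
    = PySem.List.pySetD st i
        (L.foldl (rowUpd W (PySem.List.pyGetD weights i 0) (PySem.List.pyGetD st (i-1) []))
          (PySem.List.pyGetD st i [])) := by
  intro L
  induction L with
  | nil =>
    intro st i hi1 hil
    simp only [List.foldl_nil]
    exact (pv_setD_self st i [] (by omega) hil).symm
  | cons j L ih =>
    intro st i hi1 hil
    have h0i : (0:Int) ≤ i := by omega
    simp only [List.foldl_cons]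
    rw [innerStep weights W st i j hi1 hil]
    rw [ih (PySem.List.pySetD st i
          (rowUpd W (PySem.List.pyGetD weights i 0) (PySem.List.pyGetD st (i-1) [])
            (PySem.List.pyGetD st i []) j)) i hi1
        (by rw [PySem.List.length_pySetD]; exact hil)]
    rw [pv_getD_setD st i (i-1) _ [] h0i hil (by omega), if_neg (show ¬ (i-1 = i) by omega)]
    rw [pv_getD_setD st i i _ [] h0i hil h0i, if_pos rfl]
    rw [pv_setD_setD st i _ _ h0i]

-- membership characterisation of A's inner row fold
lemma rowFold_mem (W w : Int) (hw : 0 ≤ w) (prev : List Bool) :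
    ∀ (L : List Int) (cur : List Bool), cur.length = (W+1).toNat →
    (∀ j ∈ L, 0 ≤ j ∧ j ≤ W) →
    ∀ k : Int, 0 ≤ k → k ≤ W →
    (PySem.List.pyGetD (L.foldl (rowUpd W w prev) cur) k false = true ↔
     (PySem.List.pyGetD cur k false = true ∨
      ∃ j ∈ L, PySem.List.pyGetD prev j false = true ∧ (k = j ∨ (k = j + w ∧ j + w ≤ W)))) := by
  intro L
  induction L with
  | nil => intro cur hlen hL k hk0 hkW; simp
  | cons j L ih =>
    intro cur hlen hL k hk0 hkW
    have hj := hL j (List.mem_cons_self)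
    have hW0 : (0:Int) ≤ W := le_trans hk0 hkW
    have hclen : (cur.length : Int) = W + 1 := by rw [hlen]; omega
    have hlen' : (rowUpd W w prev cur j).length = (W+1).toNat := by
      rw [rowUpd_length]; exact hlen
    simp only [List.foldl_cons]
    rw [ih (rowUpd W w prev cur j) hlen' (fun j' hj' => hL j' (List.mem_cons_of_mem _ hj')) k hk0 hkW]
    have hchar : (PySem.List.pyGetD (rowUpd W w prev cur j) k false = true) ↔
        (PySem.List.pyGetD cur k false = true ∨
         (PySem.List.pyGetD prev j false = true ∧ (k = j ∨ (k = j + w ∧ j + w ≤ W)))) := by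
      unfold rowUpd
      split_ifs with h1 h2
      · have hlen2 : ((PySem.List.pySetD cur j true).length : Int) = W + 1 := by
          simp [PySem.List.length_pySetD, hclen]
        rw [pv_getD_setD _ (j+w) k true false (by omega) (by omega) hk0]
        rw [pv_getD_setD cur j k true false (by omega) (by omega) hk0]
        constructor
        · intro h
          split_ifs at h with e1 e2
          · exact Or.inr ⟨h1, Or.inr ⟨e1, h2⟩⟩
          · exact Or.inr ⟨h1, Or.inl e2⟩
          · exact Or.inl h
        · intro h
          rcases h with h | ⟨_, h | ⟨h, _⟩⟩
          · split_ifs <;> simp [h]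
          · split_ifs <;> simp [h]
          · simp [h]
      · rw [pv_getD_setD cur j k true false (by omega) (by omega) hk0]
        constructor
        · intro h
          split_ifs at h with e1
          · exact Or.inr ⟨h1, Or.inl e1⟩
          · exact Or.inl h
        · intro h
          rcases h with h | ⟨_, h | ⟨h, hc⟩⟩
          · split_ifs <;> simp [h]
          · simp [h]
          · exact absurd hc h2
      · simp only [Bool.not_eq_true] at h1
        constructor
        · intro h; exact Or.inl h
        · intro h
          rcases h with h | ⟨hp, _⟩
          · exact h
          · rw [h1] at hp; exact absurd hp (by simp)
    rw [hchar]
    constructor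
    · rintro ((h | h) | ⟨j', hj', h⟩)
      · exact Or.inl h
      · exact Or.inr ⟨j, List.mem_cons_self, h⟩
      · exact Or.inr ⟨j', List.mem_cons_of_mem _ hj', h⟩
    · rintro (h | ⟨j', hj', h⟩)
      · exact Or.inl (Or.inl h)
      · rcases List.mem_cons.mp hj' with rfl | hj''
        · exact Or.inl (Or.inr h)
        · exact Or.inr ⟨j', hj'', h⟩

-- bit-level facts for B's bitmask
lemma nat_step_testBit (b w m k : Nat) :
    (((b ||| (b <<< w)) &&& (2^m - 1)).testBit k)
      = ((b.testBit k || (decide (w ≤ k) && b.testBit (k - w))) && decide (k < m)) := by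
  simp [Nat.testBit_or, Nat.testBit_shiftLeft]
  rw [Bool.and_comm]

lemma int_step_eq (b w m : Nat) :
    PySem.Int.band (PySem.Int.bor (b : Int) ((b : Int) <<< w)) (((1:Int) <<< m) - 1)
      = (((b ||| (b <<< w)) &&& (2^m - 1) : Nat) : Int) := by
  have h1 : ((b : Int)) <<< w = ((b <<< w : Nat) : Int) := by
    simp [Int.shiftLeft_eq, Nat.shiftLeft_eq]
  have h3 : (1:Nat) ≤ 2^m := Nat.one_le_two_pow
  have h2 : ((1:Int) <<< m) - 1 = (((2^m - 1 : Nat)) : Int) := by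
    have hs : ((1:Int) <<< m) = ((2:Int))^m := by simp [Int.shiftLeft_eq]
    rw [hs]
    push_cast [h3]
    ring
  rw [h1, PySem.Int.bor_natCast, h2, PySem.Int.band_natCast]

lemma testBit_one (k : Nat) : (1 : Nat).testBit k = decide (0 = k) := by
  simpa using (Nat.testBit_two_pow (n := 0) (m := k))

-- the descending final scan finds the highest k ≤ W with Q k
lemma find_desc (row : List Bool) (Q : Int → Bool) (W : Int)
    (hgr : ∀ k : Int, 0 ≤ k → k ≤ W → (PySem.List.pyGetD row k false = true ↔ Q k = true))
    (M : Int) (hMQ : Q M = true) (hmax : ∀ y : Int, M < y → y ≤ W → Q y = false)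
    (hM0 : 0 ≤ M) (hMW : M ≤ W) :
    ∀ (a : Int), M ≤ a → a ≤ W →
    (PySem.List.pyRange a (-1) (-1)).find? (fun k => PySem.List.pyGetD row k false) = some M := by
  intro a
  induction hc : (a - M).toNat generalizing a with
  | zero =>
    intro hMa haW
    have ha : a = M := by omega
    subst ha
    rw [PySem.List.pyRange_neg_one_cons (by omega : (-1:Int) < a)]
    exact List.find?_cons_of_pos ((hgr a hM0 haW).mpr hMQ)
  | succ c ihc =>
    intro hMa haW
    rw [PySem.List.pyRange_neg_one_cons (by omega : (-1:Int) < a)]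
    rw [List.find?_cons_of_neg, ihc (a-1) (by omega) (by omega) (by omega)]
    intro hmem
    have : Q a = true := (hgr a (by omega) haW).mp (by simpa using hmem)
    rw [hmax a (by omega) haW] at this
    exact absurd this (by simp)

-- all-false initial row
def row0 (W : Int) : List Bool := (PySem.List.pyRange 0 (W+1) 1).map (fun _ => false)

lemma row0_getD (W : Int) (k : Int) : PySem.List.pyGetD (row0 W) k false = false := by
  apply pv_getD_const
  intro x hx
  rcases List.mem_map.mp hx with ⟨_, _, rfl⟩
  rfl

lemma row0_length (W : Int) : (row0 W).length = (W+1).toNat := by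
  simp [row0, PySem.List.length_pyRange_one]

-- the loop invariant tying A's table to B's bitmask after items 0..m-1
def KInv (W n : Int) (st : List (List Bool)) (b : Nat) (m : Int) : Prop :=
  st.length = n.toNat ∧
  (∀ k : Int, 0 ≤ k → k ≤ W →
    (PySem.List.pyGetD (PySem.List.pyGetD st (m-1) []) k false = true ↔ b.testBit k.toNat = true)) ∧
  (∀ i : Int, m ≤ i → i < n → PySem.List.pyGetD st i [] = row0 W) ∧
  b < 2^(W+1).toNat ∧ b.testBit 0 = true

-- one item step preserves the invariant (and B's Int value stays a Nat)
lemma stepInv (weights : List Int) (W n : Int) (hW : 0 ≤ W)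
    (hnl : n ≤ (weights.length : Int))
    (hwts : ∀ x ∈ weights.take n.toNat, 0 ≤ x)
    (m : Int) (hm1 : 1 ≤ m) (hmn : m < n)
    (st : List (List Bool)) (bn : Nat) (hInv : KInv W n st bn m) :
    ∃ bn' : Nat,
      (if PySem.List.pyGetD weights m 0 ≤ W then
        PySem.Int.band (PySem.Int.bor (bn : Int) ((bn : Int) <<< (PySem.List.pyGetD weights m 0).toNat))
          (((1:Int) <<< (W + 1).toNat) - 1)
      else (bn : Int)) = (bn' : Int) ∧
      KInv W n
        ((PySem.List.pyRange 0 (W+1) 1).foldl (fun st2 j =>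
          if PySem.List.pyGetD (PySem.List.pyGetD st2 (m-1) []) j false then
            let st3 := PySem.List.pySetD st2 m (PySem.List.pySetD (PySem.List.pyGetD st2 m []) j true)
            if j + PySem.List.pyGetD weights m 0 ≤ W then
              PySem.List.pySetD st3 m
                (PySem.List.pySetD (PySem.List.pyGetD st3 m [])
                  (j + PySem.List.pyGetD weights m 0) true)
            else st3
          else st2) st)
        bn' (m + 1) := by
  obtain ⟨hlen, hrow, hrest, hbnd, h0⟩ := hInv
  have hm0i : (0:Int) ≤ m := by omega
  have hstl : (st.length : Int) = n := by rw [hlen]; omega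
  have hmst : m < (st.length : Int) := by omega
  have hwnn : 0 ≤ PySem.List.pyGetD weights m 0 := by
    have hml : m < (weights.length : Int) := by omega
    rw [PySem.List.pyGetD_eq_getElem weights 0 hm0i hml]
    have hlt : m.toNat < (weights.take n.toNat).length := by
      simp [List.length_take]; omega
    have := hwts ((weights.take n.toNat)[m.toNat]'hlt) (List.getElem_mem hlt)
    rwa [List.getElem_take] at this
  set w := PySem.List.pyGetD weights m 0 with hwdef
  -- the new row of A's table
  rw [innerEq weights W _ st m hm1 hmst]
  rw [hrest m (le_refl m) hmn]
  have hrowmem := rowFold_mem W w hwnn (PySem.List.pyGetD st (m-1) [])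
      (PySem.List.pyRange 0 (W+1) 1) (row0 W) (row0_length W)
      (fun j hj => by
        rcases (PySem.List.mem_pyRange_one).mp hj with ⟨h1, h2⟩
        exact ⟨h1, by omega⟩)
  by_cases hwle : w ≤ W
  · refine ⟨(bn ||| (bn <<< w.toNat)) &&& (2^(W+1).toNat - 1), ?_, ?_, ?_, ?_, ?_, ?_⟩
    · rw [if_pos hwle]; exact int_step_eq bn w.toNat (W+1).toNat
    · rw [PySem.List.length_pySetD]; exact hlen
    · intro k hk0 hkW
      rw [show m + 1 - 1 = m by ring]
      rw [pv_getD_setD st m m _ [] hm0i hmst hm0i, if_pos rfl]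
      rw [hrowmem k hk0 hkW, nat_step_testBit]
      have hkm : k.toNat < (W+1).toNat := by omega
      constructor
      · rintro (h | ⟨j, hj, hpj, hcase⟩)
        · rw [row0_getD] at h; exact absurd h (by simp)
        · rcases (PySem.List.mem_pyRange_one).mp hj with ⟨hj0, hjW⟩
          have hjb : bn.testBit j.toNat = true := (hrow j hj0 (by omega)).mp hpj
          rcases hcase with rfl | ⟨rfl, hle⟩
          · simp [hjb, hkm]
          · have hwk : w.toNat ≤ (j + w).toNat := by omega
            have hsub : (j + w).toNat - w.toNat = j.toNat := by omega
            simp [hkm, hwk, hsub, hjb]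
      · intro h
        simp only [Bool.and_eq_true, Bool.or_eq_true, decide_eq_true_eq] at h
        obtain ⟨h1, _⟩ := h
        rcases h1 with h1 | ⟨hwk, h1⟩
        · refine Or.inr ⟨k, ?_, (hrow k hk0 hkW).mpr h1, Or.inl rfl⟩
          exact (PySem.List.mem_pyRange_one).mpr ⟨hk0, by omega⟩
        · have hw0 : (0:Int) ≤ k - w := by omega
          refine Or.inr ⟨k - w, ?_, ?_, Or.inr ⟨by ring, by omega⟩⟩
          · exact (PySem.List.mem_pyRange_one).mpr ⟨hw0, by omega⟩
          · have : (k - w).toNat = k.toNat - w.toNat := by omega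
            rw [(hrow (k - w) hw0 (by omega)), this]
            exact h1
    · intro i hi hin
      rw [pv_getD_setD st m i _ [] hm0i hmst (by omega), if_neg (by omega)]
      exact hrest i (by omega) hin
    · have : (bn ||| (bn <<< w.toNat)) &&& (2^(W+1).toNat - 1) ≤ 2^(W+1).toNat - 1 :=
        Nat.and_le_right
      have h1 : (1:Nat) ≤ 2^(W+1).toNat := Nat.one_le_two_pow
      omega
    · have hm0 : (0:Nat) < (W+1).toNat := by omega
      rw [nat_step_testBit]
      simp [h0, hm0]
  · refine ⟨bn, by rw [if_neg hwle], ?_, ?_, ?_, hbnd, h0⟩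
    · rw [PySem.List.length_pySetD]; exact hlen
    · intro k hk0 hkW
      rw [show m + 1 - 1 = m by ring]
      rw [pv_getD_setD st m m _ [] hm0i hmst hm0i, if_pos rfl]
      rw [hrowmem k hk0 hkW]
      constructor
      · rintro (h | ⟨j, hj, hpj, hcase⟩)
        · rw [row0_getD] at h; exact absurd h (by simp)
        · rcases (PySem.List.mem_pyRange_one).mp hj with ⟨hj0, hjW⟩
          rcases hcase with rfl | ⟨rfl, hle⟩
          · exact (hrow k hj0 (by omega)).mp hpj
          · exact absurd hle (by omega)
      · intro h
        refine Or.inr ⟨k, ?_, (hrow k hk0 hkW).mpr h, Or.inl rfl⟩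
        exact (PySem.List.mem_pyRange_one).mpr ⟨hk0, by omega⟩
    · intro i hi hin
      rw [pv_getD_setD st m i _ [] hm0i hmst (by omega), if_neg (by omega)]
      exact hrest i (by omega) hin

-- the invariant propagates along the outer loop
lemma outerInv (weights : List Int) (W n : Int) (hW : 0 ≤ W)
    (hnl : n ≤ (weights.length : Int))
    (hwts : ∀ x ∈ weights.take n.toNat, 0 ≤ x) :
    ∀ (m : Nat), 1 ≤ m → (m : Int) ≤ n →
    ∀ (st : List (List Bool)) (bn : Nat), KInv W n st bn 1 →
    ∃ bn' : Nat,
      (PySem.List.pyRange 1 (m : Int) 1).foldl (fun b i =>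
        let w := PySem.List.pyGetD weights i 0
        if w ≤ W then
          PySem.Int.band (PySem.Int.bor b (b <<< w.toNat)) (((1:Int) <<< (W + 1).toNat) - 1)
        else b) (bn : Int) = (bn' : Int) ∧
      KInv W n
        ((PySem.List.pyRange 1 (m : Int) 1).foldl (fun st i =>
          (PySem.List.pyRange 0 (W+1) 1).foldl (fun st2 j =>
            if PySem.List.pyGetD (PySem.List.pyGetD st2 (i-1) []) j false then
              let st3 := PySem.List.pySetD st2 i (PySem.List.pySetD (PySem.List.pyGetD st2 i []) j true)
              if j + PySem.List.pyGetD weights i 0 ≤ W then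
                PySem.List.pySetD st3 i
                  (PySem.List.pySetD (PySem.List.pyGetD st3 i [])
                    (j + PySem.List.pyGetD weights i 0) true)
              else st3
            else st2) st) st)
        bn' (m : Int) := by
  intro m
  induction m with
  | zero => omega
  | succ m ihm =>
    intro hm1 hmn st bn hInv
    by_cases hm0 : m = 0
    · subst hm0
      have h1 : (((0+1 : Nat)) : Int) = 1 := by norm_num
      rw [h1, PySem.List.pyRange_one_eq_nil (le_refl (1:Int))]
      exact ⟨bn, by simp, hInv⟩
    · have hm1' : 1 ≤ m := by omega
      have hmn' : (m : Int) ≤ n := by push_cast at hmn ⊢; omega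
      have hcast : (((m+1 : Nat)) : Int) = (m : Int) + 1 := by push_cast; ring
      rw [hcast, PySem.List.pyRange_one_succ_right (by exact_mod_cast hm1' : (1:Int) ≤ (m:Int))]
      simp only [List.foldl_append, List.foldl_cons, List.foldl_nil]
      obtain ⟨bm, hbm, hKm⟩ := ihm hm1' hmn' st bn hInv
      obtain ⟨bn', hstep, hK'⟩ := stepInv weights W n hW hnl hwts (m : Int)
        (by exact_mod_cast hm1') (by push_cast at hmn; omega) _ bm hKm
      rw [hbm]
      exact ⟨bn', hstep, hK'⟩

-- the base case: the invariant holds after item 0 is placed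
lemma baseInv (weights : List Int) (W n : Int) (hW : 0 ≤ W) (hn1 : 1 ≤ n)
    (hnl : n ≤ (weights.length : Int))
    (hwts : ∀ x ∈ weights.take n.toNat, 0 ≤ x) :
    ∃ bn : Nat,
      (if PySem.List.pyGetD weights 0 0 ≤ W then
        PySem.Int.band (PySem.Int.bor (1:Int) ((1:Int) <<< (PySem.List.pyGetD weights 0 0).toNat))
          (((1:Int) <<< (W + 1).toNat) - 1)
      else (1:Int)) = (bn : Int) ∧
      KInv W n
        (if PySem.List.pyGetD weights 0 0 ≤ W then
          PySem.List.pySetD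
            (PySem.List.pySetD
              ((PySem.List.pyRange 0 n 1).map (fun _ => (PySem.List.pyRange 0 (W+1) 1).map (fun _ => false)))
              0
              (PySem.List.pySetD
                (PySem.List.pyGetD
                  ((PySem.List.pyRange 0 n 1).map (fun _ => (PySem.List.pyRange 0 (W+1) 1).map (fun _ => false)))
                  0 [])
                0 true))
            0
            (PySem.List.pySetD
              (PySem.List.pyGetD
                (PySem.List.pySetD
                  ((PySem.List.pyRange 0 n 1).map (fun _ => (PySem.List.pyRange 0 (W+1) 1).map (fun _ => false)))
                  0
                  (PySem.List.pySetD
                    (PySem.List.pyGetD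
                      ((PySem.List.pyRange 0 n 1).map (fun _ => (PySem.List.pyRange 0 (W+1) 1).map (fun _ => false)))
                      0 [])
                    0 true))
                0 [])
              (PySem.List.pyGetD weights 0 0) true)
        else
          PySem.List.pySetD
            ((PySem.List.pyRange 0 n 1).map (fun _ => (PySem.List.pyRange 0 (W+1) 1).map (fun _ => false)))
            0
            (PySem.List.pySetD
              (PySem.List.pyGetD
                ((PySem.List.pyRange 0 n 1).map (fun _ => (PySem.List.pyRange 0 (W+1) 1).map (fun _ => false)))
                0 [])
              0 true))
        bn 1 := by
  have hrow0 : ∀ i : Int, 0 ≤ i → i < n →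
      PySem.List.pyGetD
        ((PySem.List.pyRange 0 n 1).map (fun _ => (PySem.List.pyRange 0 (W+1) 1).map (fun _ => false)))
        i [] = row0 W := by
    intro i h1 h2
    exact PySem.List.pyGetD_map_pyRange_of_nonneg _ n i [] h1 h2
  have hlen0 : ((PySem.List.pyRange 0 n 1).map
      (fun _ : Int => (PySem.List.pyRange 0 (W+1) 1).map (fun _ : Int => false))).length = n.toNat := by
    rw [List.length_map, PySem.List.length_pyRange_one]
    norm_num
  have hlen0i : (0:Int) < (((PySem.List.pyRange 0 n 1).map
      (fun _ : Int => (PySem.List.pyRange 0 (W+1) 1).map (fun _ : Int => false))).length : Int) := by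
    rw [hlen0]; omega
  have hw00 : 0 ≤ PySem.List.pyGetD weights 0 0 := by
    have hml : (0:Int) < (weights.length : Int) := by omega
    rw [PySem.List.pyGetD_eq_getElem weights 0 (le_refl 0) hml]
    have hlt : (0:Int).toNat < (weights.take n.toNat).length := by
      simp [List.length_take]; omega
    have := hwts ((weights.take n.toNat)[(0:Int).toNat]'hlt) (List.getElem_mem hlt)
    rwa [List.getElem_take] at this
  rw [hrow0 0 (le_refl 0) (by omega)]
  have hget1 : PySem.List.pyGetD
      (PySem.List.pySetD
        ((PySem.List.pyRange 0 n 1).map (fun _ => (PySem.List.pyRange 0 (W+1) 1).map (fun _ => false)))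
        0 (PySem.List.pySetD (row0 W) 0 true))
      0 [] = PySem.List.pySetD (row0 W) 0 true := by
    rw [pv_getD_setD _ 0 0 _ [] (le_refl 0) hlen0i (le_refl 0), if_pos rfl]
  have hrow0len : ((row0 W).length : Int) = W + 1 := by rw [row0_length]; omega
  have hm0 : (0:Nat) < (W+1).toNat := by omega
  set w0 := PySem.List.pyGetD weights 0 0 with hw0def
  split_ifs with hc
  · refine ⟨(1 ||| (1 <<< w0.toNat)) &&& (2^(W+1).toNat - 1),
      by simpa using int_step_eq 1 w0.toNat (W+1).toNat, ?_, ?_, ?_, ?_, ?_⟩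
    · rw [hget1, pv_setD_setD _ 0 _ _ (le_refl 0), PySem.List.length_pySetD]
      exact hlen0
    · intro k hk0 hkW
      rw [show (1:Int) - 1 = 0 by ring]
      rw [hget1, pv_setD_setD _ 0 _ _ (le_refl 0)]
      rw [pv_getD_setD _ 0 0 _ [] (le_refl 0) hlen0i (le_refl 0), if_pos rfl]
      rw [pv_getD_setD _ w0 k true false (by omega) (by
            rw [PySem.List.length_pySetD]; omega) hk0]
      rw [pv_getD_setD (row0 W) 0 k true false (le_refl 0) (by omega) hk0]
      rw [nat_step_testBit]
      have hkm : k.toNat < (W+1).toNat := by omega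
      simp only [testBit_one]
      split_ifs with e1 e2
      · constructor
        · intro _
          simp only [Bool.and_eq_true, Bool.or_eq_true, decide_eq_true_eq]
          omega
        · intro _; rfl
      · constructor
        · intro _
          simp only [Bool.and_eq_true, Bool.or_eq_true, decide_eq_true_eq]
          omega
        · intro _; rfl
      · rw [row0_getD]
        constructor
        · intro h; exact absurd h (by simp)
        · intro h
          simp only [Bool.and_eq_true, Bool.or_eq_true, decide_eq_true_eq] at h
          exfalso
          rcases h with ⟨h1 | ⟨h2a, h2b⟩, _⟩
          · exact e2 (by omega)
          · exact e1 (by omega)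
    · intro i hi hin
      rw [hget1, pv_setD_setD _ 0 _ _ (le_refl 0)]
      rw [pv_getD_setD _ 0 i _ [] (le_refl 0) hlen0i (by omega), if_neg (by omega)]
      exact hrow0 i (by omega) hin
    · have h1 : (1:Nat) ≤ 2^(W+1).toNat := Nat.one_le_two_pow
      have := Nat.and_le_right (n := 1 ||| (1 <<< w0.toNat)) (m := 2^(W+1).toNat - 1)
      omega
    · rw [nat_step_testBit]
      simp [hm0]
  · refine ⟨1, by norm_num, ?_, ?_, ?_, ?_, ?_⟩
    · rw [PySem.List.length_pySetD]; exact hlen0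
    · intro k hk0 hkW
      rw [show (1:Int) - 1 = 0 by ring]
      rw [pv_getD_setD _ 0 0 _ [] (le_refl 0) hlen0i (le_refl 0), if_pos rfl]
      rw [pv_getD_setD (row0 W) 0 k true false (le_refl 0) (by omega) hk0]
      rw [testBit_one]
      split_ifs with e1
      · constructor
        · intro _
          simp only [decide_eq_true_eq]
          omega
        · intro _; rfl
      · rw [row0_getD]
        constructor
        · intro h; exact absurd h (by simp)
        · intro h
          simp only [decide_eq_true_eq] at h
          exact absurd (by omega : k = 0) e1
    · intro i hi hin
      rw [pv_getD_setD _ 0 i _ [] (le_refl 0) hlen0i (by omega), if_neg (by omega)]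
      exact hrow0 i (by omega) hin
    · exact Nat.one_lt_two_pow_iff.mpr (by omega)
    · simp

-- the final descending scan of A equals bits.bit_length() - 1 of B
lemma finalStep (W n : Int) (st : List (List Bool)) (bn : Nat) (hW : 0 ≤ W)
    (hrow : ∀ k : Int, 0 ≤ k → k ≤ W →
      (PySem.List.pyGetD (PySem.List.pyGetD st (n-1) []) k false = true ↔ bn.testBit k.toNat = true))
    (hlt : bn < 2^(W+1).toNat) (h0 : bn.testBit 0 = true) :
    (match (PySem.List.pyRange W (-1) (-1)).find?
        (fun k => PySem.List.pyGetD (PySem.List.pyGetD st (n-1) []) k false) with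
     | some k => k
     | none => 0)
    = (PySem.Int.bitLength (bn : Int) : Int) - 1 := by
  have hbn0 : bn ≠ 0 := by
    intro h; rw [h] at h0; simp at h0
  set bl := PySem.Int.bitLength (bn : Int) with hbl
  have hup : bn < 2 ^ bl := by
    have := PySem.Int.lt_two_pow_bitLength (bn : Int)
    simpa using this
  have hlo : 2 ^ (bl - 1) ≤ bn := by
    have := PySem.Int.two_pow_bitLength_le (bn : Int) (by exact_mod_cast hbn0)
    simpa using this
  have hbl1 : 1 ≤ bl := by
    by_contra h
    have : bl = 0 := by omega
    rw [this] at hup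
    omega
  have hblW : bl ≤ (W+1).toNat := by
    by_contra h
    have h2 : (W+1).toNat ≤ bl - 1 := by omega
    have := Nat.pow_le_pow_right (by norm_num : 1 ≤ 2) h2
    omega
  set M : Int := (bl : Int) - 1 with hM
  have hM0 : 0 ≤ M := by omega
  have hMW : M ≤ W := by omega
  have hMt : M.toNat = bl - 1 := by omega
  have hQM : bn.testBit M.toNat = true := by
    rw [hMt, Nat.testBit_eq_decide_div_mod_eq]
    have h2bl : (2:Nat) ^ bl = 2 * 2 ^ (bl - 1) := by
      rw [← pow_succ']
      congr 1
      omega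
    have hdiv : bn / 2 ^ (bl - 1) = 1 :=
      Nat.div_eq_of_lt_le (by simpa using hlo) (by omega)
    simp [hdiv]
  have hmax : ∀ y : Int, M < y → y ≤ W → bn.testBit y.toNat = false := by
    intro y hy1 hy2
    apply Nat.testBit_lt_two_pow
    calc bn < 2 ^ bl := hup
    _ ≤ 2 ^ y.toNat := Nat.pow_le_pow_right (by norm_num) (by omega)
  rw [find_desc (PySem.List.pyGetD st (n-1) []) (fun k => bn.testBit k.toNat) W hrow
      M hQM hmax hM0 hMW W hMW (le_refl W)]

-- ===== VERDICT (by name: the statement is the Claim_ definition above) =====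
theorem solution_max_weight_spec : Claim_equal_solution_max_weight := by
  intro weights W n hdom hpre
  obtain ⟨hn1, hnl, hW, hwts⟩ := hpre
  show solution_max_weight weights W n = solution_max_weight_alt weights W n
  simp only [solution_max_weight, solution_max_weight_alt]
  obtain ⟨bn1, hB1, hK1⟩ := baseInv weights W n hW hn1 hnl hwts
  rw [hB1]
  obtain ⟨bnF, hBF, hKF⟩ := outerInv weights W n hW hnl hwts n.toNat (by omega) (by omega) _ bn1 hK1
  rw [show ((n.toNat : Int)) = n by omega] at hBF hKF
  rw [hBF]
  obtain ⟨hlen, hrow, hrest, hbnd, h0⟩ := hKF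
  exact finalStep W n _ bnF hW hrow hbnd h0
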